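-- pv_equiv track=rewrite | github.com/Jenifer-hernandez/Prolog_Ejercicios | MPP.py | donde
-- ===== SOURCE A (Python) =====
-- def donde(X,Y):
-- 	if not X:
-- 		return []
-- 	if len(X):
-- 		if Y == X[0][0]:
-- 			return X[0][1]
-- 		else:
-- 			return donde(X[1:],Y)
-- ===== SOURCE B (Python) =====
-- def donde(X, Y):
--     return next((pair[1] for pair in X if Y == pair[0]), [])
-- ===== Notes on version B (the rewrite author's own statement) =====
-- stated objective: idiomatic
-- what changed: Replaces the tail recursion over X[1:] slices by an idiomatic single expression: next() over a generator scanning the pairs, with default [].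
import Mathlib
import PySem

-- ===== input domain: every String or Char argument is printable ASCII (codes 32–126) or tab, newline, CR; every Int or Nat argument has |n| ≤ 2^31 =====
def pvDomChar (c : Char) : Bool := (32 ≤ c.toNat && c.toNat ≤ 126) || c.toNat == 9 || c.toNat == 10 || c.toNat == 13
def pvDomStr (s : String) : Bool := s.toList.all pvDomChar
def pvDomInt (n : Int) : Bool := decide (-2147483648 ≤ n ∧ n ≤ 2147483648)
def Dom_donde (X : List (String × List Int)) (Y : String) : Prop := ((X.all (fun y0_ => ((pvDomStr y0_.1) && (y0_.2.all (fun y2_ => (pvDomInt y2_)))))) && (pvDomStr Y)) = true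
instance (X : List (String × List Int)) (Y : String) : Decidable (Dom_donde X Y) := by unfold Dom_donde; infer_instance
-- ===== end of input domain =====

-- B replaces A's tail recursion with list slicing by an idiomatic single scan
-- (next over a generator with default []); equivalence of return values is proved below.

-- ===== PORT A =====
-- literal transliteration of A: empty check, then len check, head compare, recurse on X[1:];
-- the fall-through (unreachable: len(X) ≠ 0 when X nonempty) returns none (Python None).
def donde (X : List (String × List Int)) (Y : String) : Option (List Int) :=
  if X = [] then some []
  else if X.length ≠ 0 then
    match X with
    | [] => none
    | p :: rest => if Y = p.1 then some p.2 else donde rest Y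
  else none

-- ===== PORT B =====
-- transliteration of B: first pair whose key equals Y (List.find?), default [].
def donde_alt (X : List (String × List Int)) (Y : String) : Option (List Int) :=
  some (match X.find? (fun p => Y == p.1) with
        | some p => p.2
        | none => [])

-- ===== PRECONDITION & SPEC =====
def Spec_donde (X : List (String × List Int)) (Y : String) (out : Option (List Int)) : Prop := out = donde_alt X Y
instance (X : List (String × List Int)) (Y : String) (out : Option (List Int)) : Decidable (Spec_donde X Y out) := by unfold Spec_donde; infer_instance

-- ===== CLAIM (what is proved, stated in full; the proofs are below) =====
def Claim_equal_donde : Prop := ∀ (X : List (String × List Int)) (Y : String), Dom_donde X Y → Spec_donde X Y (donde X Y)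

-- ===== LEMMAS AND PROOFS =====
theorem donde_eq_alt (X : List (String × List Int)) (Y : String) :
    donde X Y = donde_alt X Y := by
  induction X with
  | nil => simp [donde, donde_alt]
  | cons p rest ih =>
      by_cases h : Y = p.1
      · simp [donde, donde_alt, List.find?, h]
      · have h' : (Y == p.1) = false := by simpa using h
        simp [donde, donde_alt, List.find?, h, h', ih]

-- ===== VERDICT (by name: the statement is the Claim_ definition above) =====
theorem donde_spec : Claim_equal_donde := by
  intro X Y _
  exact donde_eq_alt X Y
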